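-- pv_equiv track=rewrite | github.com/svenwelink/AdventOfCode | 2023/day07.py | getCardsPowerPartTwo
-- ===== SOURCE A (Python) =====
-- cardValueCharPartTwo = ["J", "T", "Q", "K", "A"]
--
-- def getCardsPowerPartTwo(hand):
--     cardsPower = 0
--     for i in range(len(hand)):
--         card = hand[i]
--         if card.isnumeric():
--             cardsPower += int(card) * 100 ** (len(hand) - 1 - i)
--         else:
--             cardNumber = int(cardValueCharPartTwo.index(card) * 10)
--             cardsPower += cardNumber * 100 ** (len(hand) - 1 - i)
--     return(cardsPower)
-- ===== SOURCE B (Python) =====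
-- cardValueCharPartTwo = ["J", "T", "Q", "K", "A"]
--
-- def getCardsPowerPartTwo(hand):
--     # Horner scheme: running multiply-accumulate instead of explicit 100**(len-1-i) weights.
--     cardsPower = 0
--     for card in hand:
--         if card.isnumeric():
--             value = int(card)
--         else:
--             value = cardValueCharPartTwo.index(card) * 10
--         cardsPower = cardsPower * 100 + value
--     return cardsPower
-- ===== Notes on version B (the rewrite author's own statement) =====
-- stated objective: simpler
-- what changed: Replaces the index loop with explicit positional weights 100**(len(hand)-1-i) by a direct iteration over the characters with a Horner-style accumulator (power = power*100 + value), removing the length/index arithmetic and the exponentiation.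
import Mathlib
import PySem

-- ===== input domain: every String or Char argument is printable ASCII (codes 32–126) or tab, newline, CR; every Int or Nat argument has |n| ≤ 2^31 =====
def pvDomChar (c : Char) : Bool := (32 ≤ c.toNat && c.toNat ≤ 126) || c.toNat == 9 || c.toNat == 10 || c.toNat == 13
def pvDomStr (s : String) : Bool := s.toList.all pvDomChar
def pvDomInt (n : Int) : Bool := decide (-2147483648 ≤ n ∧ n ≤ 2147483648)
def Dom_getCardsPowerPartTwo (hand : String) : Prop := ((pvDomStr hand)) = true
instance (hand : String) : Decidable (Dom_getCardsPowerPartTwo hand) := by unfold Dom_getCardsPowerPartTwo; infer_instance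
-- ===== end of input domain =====

-- B iterates over the characters with a Horner accumulator (power*100 + value) instead of
-- A's index loop with explicit 100**(len-1-i) positional weights; same per-card values.

-- ===== PORT A =====
def cardValueCharPartTwo : List Char := ['J', 'T', 'Q', 'K', 'A']

-- literal port of A: loop over i in range(len(hand)), add value * 100**(len-1-i).
-- card.isnumeric() ported as PySem.Chars.isdigit (exact on the printable-ASCII domain);
-- int(card) as (PySem.Int.ofChars? [card]).getD 0 and list.index as (index? …).getD 0 —
-- the .getD defaults are only reached where Python raises, which Pre_ excludes.
def getCardsPowerPartTwo (hand : String) : Int :=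
  (List.range hand.toList.length).foldl (fun cardsPower i =>
    let card := hand.toList.getD i ' '
    if PySem.Chars.isdigit card then
      cardsPower + (PySem.Int.ofChars? [card]).getD 0 * 100 ^ (hand.toList.length - 1 - i)
    else
      let cardNumber : Int := ((PySem.List.index? cardValueCharPartTwo card).getD 0 : Int) * 10
      cardsPower + cardNumber * 100 ^ (hand.toList.length - 1 - i)) 0

-- ===== PORT B =====
-- literal port of B: fold over the characters, Horner accumulation.
def getCardsPowerPartTwo_alt (hand : String) : Int :=
  hand.toList.foldl (fun cardsPower card =>
    let value : Int :=
      if PySem.Chars.isdigit card then (PySem.Int.ofChars? [card]).getD 0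
      else ((PySem.List.index? cardValueCharPartTwo card).getD 0 : Int) * 10
    cardsPower * 100 + value) 0

-- ===== PRECONDITION & SPEC =====
-- Pre_ excludes exactly the inputs on which Python A raises: a non-digit card absent from
-- cardValueCharPartTwo makes list.index raise ValueError.
def Pre_getCardsPowerPartTwo (hand : String) : Prop :=
  hand.toList.all
    (fun c => PySem.Chars.isdigit c || (['J', 'T', 'Q', 'K', 'A'] : List Char).contains c) = true
instance (hand : String) : Decidable (Pre_getCardsPowerPartTwo hand) := by
  unfold Pre_getCardsPowerPartTwo; infer_instance
def pvWitness_getCardsPowerPartTwo : String := "32T3K"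

def Spec_getCardsPowerPartTwo (hand : String) (out : Int) : Prop := out = getCardsPowerPartTwo_alt hand
instance (hand : String) (out : Int) : Decidable (Spec_getCardsPowerPartTwo hand out) := by
  unfold Spec_getCardsPowerPartTwo; infer_instance

-- ===== CLAIM (what is proved, stated in full; the proofs are below) =====
def Claim_equal_getCardsPowerPartTwo : Prop := ∀ (hand : String), Dom_getCardsPowerPartTwo hand → Pre_getCardsPowerPartTwo hand → Spec_getCardsPowerPartTwo hand (getCardsPowerPartTwo hand)

-- ===== LEMMAS AND PROOFS =====

-- the common per-card value
def pvVal (c : Char) : Int :=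
  if PySem.Chars.isdigit c then (PySem.Int.ofChars? [c]).getD 0
  else ((PySem.List.index? cardValueCharPartTwo c).getD 0 : Int) * 10

-- place-value reference function
def pvRef : List Char → Int
  | [] => 0
  | c :: cs => pvVal c * 100 ^ cs.length + pvRef cs

lemma pv_foldl_add (l : List Nat) (g : Nat → Int) (a : Int) :
    l.foldl (fun p i => p + g i) a = a + (l.map g).sum := by
  induction l generalizing a with
  | nil => simp
  | cons x l ih => simp [List.foldl_cons, ih]; ring

lemma pv_sum_eq_ref (cs : List Char) :
    ((List.range cs.length).map
      (fun i => pvVal (cs.getD i ' ') * 100 ^ (cs.length - 1 - i))).sum = pvRef cs := by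
  induction cs with
  | nil => simp [pvRef]
  | cons c cs ih =>
    rw [List.length_cons, List.range_succ_eq_map, List.map_cons, List.map_map, List.sum_cons]
    have h : ((List.range cs.length).map
        ((fun i => pvVal ((c :: cs).getD i ' ') * 100 ^ (cs.length + 1 - 1 - i)) ∘ Nat.succ))
        = (List.range cs.length).map (fun i => pvVal (cs.getD i ' ') * 100 ^ (cs.length - 1 - i)) := by
      apply List.map_congr_left
      intro i _
      simp only [Function.comp]
      have he : cs.length + 1 - 1 - (i + 1) = cs.length - 1 - i := by omega
      rw [he]
      simp
    rw [h, ih]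
    simp [pvRef]

lemma pv_horner (cs : List Char) (a : Int) :
    cs.foldl (fun p c => p * 100 + pvVal c) a = a * 100 ^ cs.length + pvRef cs := by
  induction cs generalizing a with
  | nil => simp [pvRef]
  | cons c cs ih =>
    rw [List.foldl_cons, ih, pvRef]
    simp [pow_succ]
    ring

lemma pvA_eq_ref (hand : String) : getCardsPowerPartTwo hand = pvRef hand.toList := by
  unfold getCardsPowerPartTwo
  have h : (fun (cardsPower : Int) (i : Nat) =>
      let card := hand.toList.getD i ' '
      if PySem.Chars.isdigit card then
        cardsPower + (PySem.Int.ofChars? [card]).getD 0 * 100 ^ (hand.toList.length - 1 - i)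
      else
        let cardNumber : Int := ((PySem.List.index? cardValueCharPartTwo card).getD 0 : Int) * 10
        cardsPower + cardNumber * 100 ^ (hand.toList.length - 1 - i))
      = (fun p i => p + pvVal (hand.toList.getD i ' ') * 100 ^ (hand.toList.length - 1 - i)) := by
    funext p i
    simp only [pvVal]
    split_ifs <;> ring
  rw [h, pv_foldl_add, pv_sum_eq_ref]
  ring

lemma pvB_eq_ref (hand : String) : getCardsPowerPartTwo_alt hand = pvRef hand.toList := by
  unfold getCardsPowerPartTwo_alt
  have h : (fun (cardsPower : Int) (card : Char) =>
      let value : Int :=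
        if PySem.Chars.isdigit card then (PySem.Int.ofChars? [card]).getD 0
        else ((PySem.List.index? cardValueCharPartTwo card).getD 0 : Int) * 10
      cardsPower * 100 + value)
      = (fun p c => p * 100 + pvVal c) := by
    funext p c
    simp [pvVal]
  rw [h, pv_horner]
  ring

-- ===== VERDICT (by name: the statement is the Claim_ definition above) =====
theorem getCardsPowerPartTwo_spec : Claim_equal_getCardsPowerPartTwo := by
  intro hand _ _
  unfold Spec_getCardsPowerPartTwo
  rw [pvA_eq_ref, pvB_eq_ref]
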